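-- pv_equiv track=rewrite | github.com/Matteo-Candi/Master-Thesis | benchmark/Python_formatted.py | minimum_cost_of_breaking
-- ===== SOURCE A (Python) =====
-- def minimum_cost_of_breaking(x, y, m, n):
--     res = 0
--     x.sort(reverse = True)
--     y.sort(reverse = True)
--     hzntl, vert = 1, 1
--     i, j = 0, 0
--     while i < m and j < n:
--         if x[i] > y[j]:
--             res += x[i] * vert
--             hzntl += 1
--             i += 1
--         else:
--             res += y[j] * hzntl
--             vert += 1
--             j += 1
--     total = 0
--     while i < m:
--         total += x[i]
--         i += 1
--     res += total * vert
--     total = 0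
--     while j < n:
--         total += y[j]
--         j += 1
--     res += total * hzntl
--     return res
-- ===== SOURCE B (Python) =====
-- def minimum_cost_of_breaking(x, y, m, n):
--     x.sort(reverse=True)
--     y.sort(reverse=True)
--     a = x[:max(m, 0)]
--     b = y[:max(n, 0)]
--
--     def count_ge(lst, t):
--         # lst is sorted descending: number of elements >= t, by binary search
--         lo, hi = 0, len(lst)
--         while lo < hi:
--             mid = (lo + hi) // 2
--             if lst[mid] >= t:
--                 lo = mid + 1
--             else:
--                 hi = mid
--         return lo
--
--     res = sum(v * (1 + count_ge(b, v)) for v in a)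
--     res += sum(w * (1 + count_ge(a, w + 1)) for w in b)
--     return res
-- ===== Notes on version B (the rewrite author's own statement) =====
-- stated objective: alternative
-- what changed: Replaced the two-pointer merge with running hzntl/vert counters plus two tail loops by a closed-form contribution sum: each of the top-m x cuts v contributes v*(1 + #{top-n y cuts >= v}) and each y cut w contributes w*(1 + #{x cuts > w}), the counts obtained by binary search on the sorted lists.
import Mathlib
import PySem

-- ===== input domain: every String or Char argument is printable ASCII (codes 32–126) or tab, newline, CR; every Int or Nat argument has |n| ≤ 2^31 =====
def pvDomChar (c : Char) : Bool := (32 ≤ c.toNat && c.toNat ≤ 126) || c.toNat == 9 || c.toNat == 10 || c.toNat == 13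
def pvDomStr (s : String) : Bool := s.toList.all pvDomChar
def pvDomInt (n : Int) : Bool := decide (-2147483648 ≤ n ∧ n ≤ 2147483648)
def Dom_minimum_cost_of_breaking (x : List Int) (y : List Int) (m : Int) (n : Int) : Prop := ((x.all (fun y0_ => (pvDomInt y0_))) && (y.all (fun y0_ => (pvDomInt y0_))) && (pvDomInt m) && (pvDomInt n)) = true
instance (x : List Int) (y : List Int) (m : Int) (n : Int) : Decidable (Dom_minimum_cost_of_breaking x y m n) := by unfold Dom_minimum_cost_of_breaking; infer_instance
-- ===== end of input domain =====

-- B replaces A's two-pointer merge (hzntl/vert counters + two tail loops) by a closed-form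
-- contribution sum over the top-m x cuts and top-n y cuts (objective: alternative; both sort
-- their list arguments in place, so the in-place mutation of x and y is identical).

-- ===== PORT A =====
-- while i < m: total += x[i]; i += 1   (the two tail loops of A)
def pvTail (xs : List Int) (bound : Int) (i : Int) (total : Int) : Int :=
  if i < bound then pvTail xs bound (i + 1) (total + PySem.List.pyGetD xs i 0)
  else total
termination_by (bound - i).toNat
decreasing_by omega

-- the main while loop of A together with its continuation (the two tail loops and final adds)
def pvRunA (xs ys : List Int) (m n i j res hz vt : Int) : Int :=
  if i < m ∧ j < n then
    if PySem.List.pyGetD xs i 0 > PySem.List.pyGetD ys j 0 then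
      pvRunA xs ys m n (i + 1) j (res + PySem.List.pyGetD xs i 0 * vt) (hz + 1) vt
    else
      pvRunA xs ys m n i (j + 1) (res + PySem.List.pyGetD ys j 0 * hz) hz (vt + 1)
  else
    (res + pvTail xs m i 0 * vt) + pvTail ys n j 0 * hz
termination_by ((m - i) + (n - j)).toNat
decreasing_by all_goals omega

def minimum_cost_of_breaking (x : List Int) (y : List Int) (m : Int) (n : Int) : Int :=
  let xs := PySem.List.sorted x (fun v => v) true
  let ys := PySem.List.sorted y (fun v => v) true
  pvRunA xs ys m n 0 0 0 1 1

-- ===== PORT B =====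
-- count_ge(lst, t): lst sorted descending, number of elements >= t, by binary search
def pvCountGe (lst : List Int) (t : Int) (lo hi : Int) : Int :=
  if lo < hi then
    let mid := PySem.Int.floordiv (lo + hi) 2
    if PySem.List.pyGetD lst mid 0 ≥ t then pvCountGe lst t (mid + 1) hi
    else pvCountGe lst t lo mid
  else lo
termination_by (hi - lo).toNat
decreasing_by
  · have h1 := (PySem.Int.le_floordiv_iff_mul_le (a := lo + hi) (b := 2) (q := lo) (by omega)).mpr (by omega)
    omega
  · have h2 := (PySem.Int.floordiv_lt_iff_lt_mul (a := lo + hi) (b := 2) (q := hi) (by omega)).mpr (by omega)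
    omega

def minimum_cost_of_breaking_alt (x : List Int) (y : List Int) (m : Int) (n : Int) : Int :=
  let xs := PySem.List.sorted x (fun v => v) true
  let ys := PySem.List.sorted y (fun v => v) true
  let a := PySem.List.slice xs none (some (max m 0))
  let b := PySem.List.slice ys none (some (max n 0))
  let res := (a.map (fun v => v * (1 + pvCountGe b v 0 (b.length : Int)))).sum
  res + (b.map (fun w => w * (1 + pvCountGe a (w + 1) 0 (a.length : Int)))).sum

-- ===== PRECONDITION & SPEC =====
-- Pre_ excludes exactly the inputs on which A raises IndexError: m > len(x) or n > len(y)
-- (the loops then index past the end of the sorted list).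
def Pre_minimum_cost_of_breaking (x : List Int) (y : List Int) (m : Int) (n : Int) : Prop :=
  m ≤ (x.length : Int) ∧ n ≤ (y.length : Int)
instance (x : List Int) (y : List Int) (m : Int) (n : Int) : Decidable (Pre_minimum_cost_of_breaking x y m n) := by unfold Pre_minimum_cost_of_breaking; infer_instance

def pvWitness_minimum_cost_of_breaking : List Int × List Int × Int × Int := ([3, 1, 2], [2, 1], 3, 2)

def Spec_minimum_cost_of_breaking (x : List Int) (y : List Int) (m : Int) (n : Int) (out : Int) : Prop := out = minimum_cost_of_breaking_alt x y m n
instance (x : List Int) (y : List Int) (m : Int) (n : Int) (out : Int) : Decidable (Spec_minimum_cost_of_breaking x y m n out) := by unfold Spec_minimum_cost_of_breaking; infer_instance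

-- ===== CLAIM (what is proved, stated in full; the proofs are below) =====
def Claim_equal_minimum_cost_of_breaking : Prop := ∀ (x : List Int) (y : List Int) (m : Int) (n : Int), Dom_minimum_cost_of_breaking x y m n → Pre_minimum_cost_of_breaking x y m n → Spec_minimum_cost_of_breaking x y m n (minimum_cost_of_breaking x y m n)

-- ===== LEMMAS AND PROOFS =====

-- proof-side list-level version of A's merge-then-tails process
def pvMerge : List Int → List Int → Int → Int → Int → Int
  | [], b, res, hz, _vt => res + b.sum * hz
  | u :: a, [], res, _hz, vt => res + (u :: a).sum * vt
  | u :: a, w :: b, res, hz, vt =>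
    if w < u then pvMerge a (w :: b) (res + u * vt) (hz + 1) vt
    else pvMerge (u :: a) b (res + w * hz) hz (vt + 1)
termination_by a b => a.length + b.length

theorem pvMerge_nil_right (a : List Int) (res hz vt : Int) :
    pvMerge a [] res hz vt = res + a.sum * vt := by
  cases a with
  | nil => simp [pvMerge]
  | cons u a => simp [pvMerge]

-- the closed-form invariant: with prefixes P, Q already consumed, the merge from (a, b)
-- adds exactly B's contribution sums (counts taken over the full lists P ++ a, Q ++ b)
theorem pv_core (a b P Q : List Int) (res : Int)
    (ha : a.Pairwise (fun p q : Int => q ≤ p)) (hb : b.Pairwise (fun p q : Int => q ≤ p))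
    (hP : ∀ v ∈ P, ∀ w ∈ b, w < v) (hQ : ∀ w ∈ Q, ∀ v ∈ a, v ≤ w) :
    pvMerge a b res ((P.length : Int) + 1) ((Q.length : Int) + 1)
      = res
        + (a.map (fun v => v * (1 + ((Q ++ b).countP (fun w => decide (v ≤ w)) : Int)))).sum
        + (b.map (fun w => w * (1 + ((P ++ a).countP (fun v => decide (w < v)) : Int)))).sum := by
  match a, b with
  | [], b =>
    have hcnt : ∀ w ∈ b, (P.countP (fun v => decide (w < v)) : Int) = P.length := by
      intro w hw
      rw [List.countP_eq_length.mpr (fun v hv => by simp [hP v hv w hw])]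
    simp only [pvMerge, List.map_nil, List.sum_nil, List.append_nil]
    have hmap : (b.map (fun w => w * (1 + (P.countP (fun v => decide (w < v)) : Int))))
        = (b.map (fun w => w * ((P.length : Int) + 1))) := by
      apply List.map_congr_left
      intro w hw
      rw [hcnt w hw]; ring
    rw [hmap, List.sum_map_mul_right b (fun w => w) ((P.length : Int) + 1)]
    simp
  | u :: a, [] =>
    have hcnt : ∀ v ∈ u :: a, (Q.countP (fun w => decide (v ≤ w)) : Int) = Q.length := by
      intro v hv
      rw [List.countP_eq_length.mpr (fun w hw => by simp [hQ w hw v hv])]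
    rw [pvMerge_nil_right]
    simp only [List.map_nil, List.sum_nil, List.append_nil, add_zero]
    have hmap : ((u :: a).map (fun v => v * (1 + (Q.countP (fun w => decide (v ≤ w)) : Int))))
        = ((u :: a).map (fun v => v * ((Q.length : Int) + 1))) := by
      apply List.map_congr_left
      intro v hv
      rw [hcnt v hv]; ring
    rw [hmap, List.sum_map_mul_right (u :: a) (fun v => v) ((Q.length : Int) + 1)]
    simp
  | u :: a, w :: b =>
    rw [List.pairwise_cons] at ha hb
    by_cases hc : w < u
    · -- x-cut u is taken: its count over Q ++ (w :: b) is |Q|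
      have hQu : (Q.countP (fun w' => decide (u ≤ w')) = Q.length) :=
        List.countP_eq_length.mpr (fun w' hw' => by
          simpa using hQ w' hw' u (List.mem_cons_self))
      have hbu : ((w :: b).countP (fun w' => decide (u ≤ w')) = 0) :=
        List.countP_eq_zero.mpr (fun w' hw' => by
          rcases List.mem_cons.mp hw' with h | h
          · subst h; simpa using not_le.mpr hc
          · have : w' ≤ w := hb.1 w' h
            simpa using not_le.mpr (lt_of_le_of_lt this hc))
      have ih := pv_core a (w :: b) (P ++ [u]) Q (res + u * ((Q.length : Int) + 1))
        ha.2 (List.pairwise_cons.mpr hb)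
        (by
          intro v hv w' hw'
          rcases List.mem_append.mp hv with h | h
          · exact hP v h w' hw'
          · have hv' : v = u := by simpa using h
            subst hv'
            rcases List.mem_cons.mp hw' with h' | h'
            · subst h'; exact hc
            · exact lt_of_le_of_lt (hb.1 w' h') hc)
        (fun w' hw' v hv => hQ w' hw' v (List.mem_cons_of_mem u hv))
      have hstep : pvMerge (u :: a) (w :: b) res ((P.length : Int) + 1) ((Q.length : Int) + 1)
          = pvMerge a (w :: b) (res + u * ((Q.length : Int) + 1)) (((P.length : Int) + 1) + 1) ((Q.length : Int) + 1) := by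
        simp [pvMerge, hc]
      rw [hstep]
      have hlen : ((P ++ [u]).length : Int) + 1 = ((P.length : Int) + 1) + 1 := by
        simp
      rw [← hlen, ih]
      have hApp : (P ++ [u]) ++ a = P ++ u :: a := by simp
      rw [hApp]
      simp only [List.map_cons, List.sum_cons, List.countP_append, hQu, hbu]
      push_cast
      ring
    · -- y-cut w is taken: its count over P ++ (u :: a) is |P|
      have hPw : (P.countP (fun v => decide (w < v)) = P.length) :=
        List.countP_eq_length.mpr (fun v hv => by
          simpa using hP v hv w (List.mem_cons_self))
      have haw : ((u :: a).countP (fun v => decide (w < v)) = 0) :=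
        List.countP_eq_zero.mpr (fun v hv => by
          rcases List.mem_cons.mp hv with h | h
          · subst h; simpa using hc
          · have : v ≤ u := ha.1 v h
            have : ¬ w < v := fun hlt => hc (lt_of_lt_of_le hlt this)
            simpa using this)
      have ih := pv_core (u :: a) b P (Q ++ [w]) (res + w * ((P.length : Int) + 1))
        (List.pairwise_cons.mpr ha) hb.2
        (fun v hv w' hw' => hP v hv w' (List.mem_cons_of_mem w hw'))
        (by
          intro w' hw' v hv
          rcases List.mem_append.mp hw' with h | h
          · exact hQ w' h v hv
          · have hw'' : w' = w := by simpa using h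
            subst hw''
            rcases List.mem_cons.mp hv with h' | h'
            · subst h'; exact le_of_not_gt hc
            · exact le_trans (ha.1 v h') (le_of_not_gt hc))
      have hstep : pvMerge (u :: a) (w :: b) res ((P.length : Int) + 1) ((Q.length : Int) + 1)
          = pvMerge (u :: a) b (res + w * ((P.length : Int) + 1)) ((P.length : Int) + 1) (((Q.length : Int) + 1) + 1) := by
        simp [pvMerge, hc]
      rw [hstep]
      have hlen : ((Q ++ [w]).length : Int) + 1 = ((Q.length : Int) + 1) + 1 := by
        simp
      rw [← hlen, ih]
      have hApp : (Q ++ [w]) ++ b = Q ++ w :: b := by simp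
      rw [hApp]
      simp only [List.map_cons, List.sum_cons, List.countP_append, hPw, haw]
      push_cast
      ring
termination_by a.length + b.length
decreasing_by all_goals (simp; try omega)

theorem pv_tail_eq (xs : List Int) (m i total : Int)
    (hi : 0 ≤ i) (hm : m ≤ (xs.length : Int)) :
    pvTail xs m i total = total + ((xs.take m.toNat).drop i.toNat).sum := by
  by_cases h : i < m
  · have hiN : i.toNat < (xs.take m.toNat).length := by
      simp only [List.length_take]
      omega
    have hget : PySem.List.pyGetD xs i 0 = xs[i.toNat]'(by simp at hiN; omega) := by
      rw [PySem.List.pyGetD_of_nonneg xs 0 hi]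
      exact List.getD_eq_getElem xs 0 (by simp at hiN; omega)
    have hdrop : (xs.take m.toNat).drop i.toNat
        = xs[i.toNat]'(by simp at hiN; omega) :: (xs.take m.toNat).drop (i.toNat + 1) := by
      rw [List.drop_eq_getElem_cons hiN]
      congr 1
      exact List.getElem_take
    rw [pvTail, if_pos h, pv_tail_eq xs m (i + 1) _ (by omega) hm, hdrop]
    have : (i + 1).toNat = i.toNat + 1 := by omega
    rw [this, hget]
    simp [List.sum_cons]
    ring
  · rw [pvTail, if_neg h]
    have : (xs.take m.toNat).drop i.toNat = [] := by
      apply List.drop_eq_nil_of_le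
      simp only [List.length_take]
      omega
    simp [this]
termination_by (m - i).toNat
decreasing_by omega

theorem pv_bridge (xs ys : List Int) (m n i j res hz vt : Int)
    (hi : 0 ≤ i) (hj : 0 ≤ j) (hm : m ≤ (xs.length : Int)) (hn : n ≤ (ys.length : Int)) :
    pvRunA xs ys m n i j res hz vt
      = pvMerge ((xs.take m.toNat).drop i.toNat) ((ys.take n.toNat).drop j.toNat) res hz vt := by
  by_cases h : i < m ∧ j < n
  · have hiN : i.toNat < (xs.take m.toNat).length := by simp only [List.length_take]; omega
    have hjN : j.toNat < (ys.take n.toNat).length := by simp only [List.length_take]; omega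
    have hgx : PySem.List.pyGetD xs i 0 = xs[i.toNat]'(by simp at hiN; omega) := by
      rw [PySem.List.pyGetD_of_nonneg xs 0 hi]
      exact List.getD_eq_getElem xs 0 (by simp at hiN; omega)
    have hgy : PySem.List.pyGetD ys j 0 = ys[j.toNat]'(by simp at hjN; omega) := by
      rw [PySem.List.pyGetD_of_nonneg ys 0 hj]
      exact List.getD_eq_getElem ys 0 (by simp at hjN; omega)
    have hdx : (xs.take m.toNat).drop i.toNat
        = xs[i.toNat]'(by simp at hiN; omega) :: (xs.take m.toNat).drop (i.toNat + 1) := by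
      rw [List.drop_eq_getElem_cons hiN]; congr 1; exact List.getElem_take
    have hdy : (ys.take n.toNat).drop j.toNat
        = ys[j.toNat]'(by simp at hjN; omega) :: (ys.take n.toNat).drop (j.toNat + 1) := by
      rw [List.drop_eq_getElem_cons hjN]; congr 1; exact List.getElem_take
    rw [pvRunA, if_pos h, hgx, hgy, hdx, hdy]
    simp only [pvMerge, gt_iff_lt]
    by_cases hc : ys[j.toNat]'(by simp at hjN; omega) < xs[i.toNat]'(by simp at hiN; omega)
    · rw [if_pos hc, if_pos hc]
      rw [pv_bridge xs ys m n (i + 1) j _ _ _ (by omega) hj hm hn]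
      have h1 : (i + 1).toNat = i.toNat + 1 := by omega
      rw [h1, ← hdy]
    · rw [if_neg hc, if_neg hc]
      rw [pv_bridge xs ys m n i (j + 1) _ _ _ hi (by omega) hm hn]
      have h1 : (j + 1).toNat = j.toNat + 1 := by omega
      rw [h1, ← hdx]
  · rw [pvRunA, if_neg h]
    rw [pv_tail_eq xs m i 0 hi hm, pv_tail_eq ys n j 0 hj hn]
    rcases not_and_or.mp h with h' | h'
    · have : (xs.take m.toNat).drop i.toNat = [] := by
        apply List.drop_eq_nil_of_le; simp only [List.length_take]; omega
      rw [this]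
      simp [pvMerge]
    · have : (ys.take n.toNat).drop j.toNat = [] := by
        apply List.drop_eq_nil_of_le; simp only [List.length_take]; omega
      rw [this, pvMerge_nil_right]
      simp
termination_by ((m - i) + (n - j)).toNat
decreasing_by all_goals omega

-- countP of a predicate that holds exactly on the first nn positions
theorem pv_countP_prefix (p : Int → Bool) (lst : List Int) (nn : Nat) (hn : nn ≤ lst.length)
    (h1 : ∀ (k : Nat) (hk : k < lst.length), k < nn → p lst[k] = true)
    (h2 : ∀ (k : Nat) (hk : k < lst.length), nn ≤ k → ¬ p lst[k] = true) :
    lst.countP p = nn := by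
  conv_lhs => rw [← List.take_append_drop nn lst]
  rw [List.countP_append]
  have ht : (lst.take nn).countP p = (lst.take nn).length := by
    apply List.countP_eq_length.mpr
    intro z hz
    obtain ⟨k, hk, hzk⟩ := List.mem_iff_getElem.mp hz
    have hk' : k < lst.length := by simp only [List.length_take] at hk; omega
    rw [← hzk, List.getElem_take]
    exact h1 k hk' (by simp only [List.length_take] at hk; omega)
  have hd : (lst.drop nn).countP p = 0 := by
    apply List.countP_eq_zero.mpr
    intro z hz
    obtain ⟨k, hk, hzk⟩ := List.mem_iff_getElem.mp hz
    have hk' : nn + k < lst.length := by simp only [List.length_drop] at hk; omega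
    rw [← hzk, List.getElem_drop]
    exact h2 (nn + k) hk' (by omega)
  rw [ht, hd]
  simp only [List.length_take, add_zero]
  omega

-- the binary search maintains: everything left of lo is ≥ t, everything from hi on is < t
theorem pvCountGe_loop (lst : List Int) (t lo hi : Int)
    (hs : lst.Pairwise (fun p q : Int => q ≤ p))
    (h0 : 0 ≤ lo) (hlh : lo ≤ hi) (hhi : hi ≤ (lst.length : Int))
    (hpre : ∀ (k : Nat) (hk : k < lst.length), k < lo.toNat → t ≤ lst[k])
    (hpost : ∀ (k : Nat) (hk : k < lst.length), hi.toNat ≤ k → ¬ t ≤ lst[k]) :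
    pvCountGe lst t lo hi = (lst.countP (fun z => decide (t ≤ z)) : Int) := by
  have horder : ∀ (k j : Nat) (hk : k < lst.length) (hj : j < lst.length), k ≤ j → lst[j] ≤ lst[k] := by
    intro k j hk hj hkj
    rcases Nat.lt_or_ge k j with h | h
    · exact (List.pairwise_iff_getElem.mp hs) k j hk hj h
    · have : k = j := by omega
      subst this; exact le_refl _
  by_cases hlt : lo < hi
  · have hm1 : lo ≤ PySem.Int.floordiv (lo + hi) 2 :=
      (PySem.Int.le_floordiv_iff_mul_le (by omega)).mpr (by omega)
    have hm2 : PySem.Int.floordiv (lo + hi) 2 < hi :=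
      (PySem.Int.floordiv_lt_iff_lt_mul (by omega)).mpr (by omega)
    have hmidN : (PySem.Int.floordiv (lo + hi) 2).toNat < lst.length := by omega
    have hget : PySem.List.pyGetD lst (PySem.Int.floordiv (lo + hi) 2) 0
        = lst[(PySem.Int.floordiv (lo + hi) 2).toNat] := by
      rw [PySem.List.pyGetD_of_nonneg lst 0 (by omega)]
      exact List.getD_eq_getElem lst 0 hmidN
    rw [pvCountGe]
    simp only [if_pos hlt, hget, ge_iff_le]
    by_cases hc : t ≤ lst[(PySem.Int.floordiv (lo + hi) 2).toNat]
    · rw [if_pos hc]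
      apply pvCountGe_loop lst t _ hi hs (by omega) (by omega) hhi
      · intro k hk hklt
        have hkm : k ≤ (PySem.Int.floordiv (lo + hi) 2).toNat := by omega
        exact le_trans hc (horder k _ hk hmidN hkm)
      · exact hpost
    · rw [if_neg hc]
      apply pvCountGe_loop lst t lo _ hs h0 (by omega) (by omega)
      · exact hpre
      · intro k hk hkge hcon
        exact hc (le_trans hcon (horder _ k hmidN hk hkge))
  · have heq : lo = hi := by omega
    rw [pvCountGe, if_neg hlt]
    have : lst.countP (fun z => decide (t ≤ z)) = lo.toNat := by
      apply pv_countP_prefix _ lst lo.toNat (by omega)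
      · intro k hk hklo
        simpa using hpre k hk hklo
      · intro k hk hkge
        simpa using hpost k hk (by omega)
    rw [this]
    omega
termination_by (hi - lo).toNat
decreasing_by all_goals omega

-- B's binary-search count is the countP of pv_core, over a descending-sorted list
theorem pvCountGe_eq (lst : List Int) (t : Int)
    (hs : lst.Pairwise (fun p q : Int => q ≤ p)) :
    pvCountGe lst t 0 (lst.length : Int) = (lst.countP (fun z => decide (t ≤ z)) : Int) := by
  apply pvCountGe_loop lst t 0 (lst.length : Int) hs le_rfl (by omega) le_rfl
  · intro k hk hklt
    omega
  · intro k hk hkge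
    omega

-- ===== VERDICT (by name: the statement is the Claim_ definition above) =====
theorem minimum_cost_of_breaking_spec : Claim_equal_minimum_cost_of_breaking := by
  unfold Claim_equal_minimum_cost_of_breaking
  intro x y m n _hdom hpre
  obtain ⟨hmx, hny⟩ := hpre
  unfold Spec_minimum_cost_of_breaking minimum_cost_of_breaking minimum_cost_of_breaking_alt
  simp only []
  have hlx : (PySem.List.sorted x (fun v => v) true).length = x.length :=
    PySem.List.length_sorted x (fun v => v) true
  have hly : (PySem.List.sorted y (fun v => v) true).length = y.length :=
    PySem.List.length_sorted y (fun v => v) true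
  rw [pv_bridge _ _ m n 0 0 0 1 1 le_rfl le_rfl (by rw [hlx]; exact hmx) (by rw [hly]; exact hny)]
  rw [PySem.List.slice_to _ (le_max_right m 0), PySem.List.slice_to _ (le_max_right n 0)]
  have hmm : (max m 0).toNat = m.toNat := by omega
  have hnn : (max n 0).toNat = n.toNat := by omega
  rw [hmm, hnn]
  have hpx : ((PySem.List.sorted x (fun v => v) true).take m.toNat).Pairwise (fun p q : Int => q ≤ p) :=
    (PySem.List.sorted_pairwise_rev x (fun v => v)).sublist (List.take_sublist _ _)
  have hpy : ((PySem.List.sorted y (fun v => v) true).take n.toNat).Pairwise (fun p q : Int => q ≤ p) :=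
    (PySem.List.sorted_pairwise_rev y (fun v => v)).sublist (List.take_sublist _ _)
  have hcore := pv_core ((PySem.List.sorted x (fun v => v) true).take m.toNat)
    ((PySem.List.sorted y (fun v => v) true).take n.toNat) [] [] 0
    hpx hpy (by simp) (by simp)
  simp only [List.nil_append, List.length_nil, Nat.cast_zero, zero_add] at hcore
  simp only [Int.toNat_zero, List.drop_zero]
  rw [hcore]
  have e1 : ∀ v : Int,
      pvCountGe ((PySem.List.sorted y (fun v => v) true).take n.toNat) v 0
        (((PySem.List.sorted y (fun v => v) true).take n.toNat).length : Int)
      = (((PySem.List.sorted y (fun v => v) true).take n.toNat).countP (fun w => decide (v ≤ w)) : Int) :=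
    fun v => pvCountGe_eq _ v hpy
  have e2 : ∀ w : Int,
      pvCountGe ((PySem.List.sorted x (fun v => v) true).take m.toNat) (w + 1) 0
        (((PySem.List.sorted x (fun v => v) true).take m.toNat).length : Int)
      = (((PySem.List.sorted x (fun v => v) true).take m.toNat).countP (fun v => decide (w < v)) : Int) := by
    intro w
    rw [pvCountGe_eq _ (w + 1) hpx]
    have hpq : (fun z : Int => decide (w + 1 ≤ z)) = (fun v : Int => decide (w < v)) := by
      funext z
      simp
    rw [hpq]
  simp only [e1, e2]
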